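-- pv_equiv track=rewrite | github.com/zackees/running-process | ci/test.py | _normalize_pytest_args
-- ===== SOURCE A (Python) =====
-- def _looks_like_pytest_target(arg: str) -> bool:
--     return (
--         arg.endswith(".py")
--         or "::" in arg
--         or "/" in arg
--         or "\\" in arg
--     )
--
-- def _normalize_pytest_args(args: list[str]) -> list[str]:
--     if not args:
--         return []
--     if any(arg.startswith("-") for arg in args):
--         return list(args)
--     targets: list[str] = []
--     selectors: list[str] = []
--     collecting_targets = True
--     for arg in args:
--         if collecting_targets and _looks_like_pytest_target(arg):
--             targets.append(arg)
--             continue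
--         collecting_targets = False
--         selectors.append(arg)
--     normalized = list(targets or args[:1])
--     if selectors:
--         normalized.extend(["-k", " and ".join(selectors)])
--     return normalized
-- ===== SOURCE B (Python) =====
-- def _looks_like_pytest_target(arg: str) -> bool:
--     return (
--         arg.endswith(".py")
--         or "::" in arg
--         or "/" in arg
--         or "\\" in arg
--     )
--
-- def _normalize_pytest_args(args: list[str]) -> list[str]:
--     if not args:
--         return []
--     if any(arg.startswith("-") for arg in args):
--         return list(args)
--     # element i is a target iff every argument up to and including it is target-like
--     in_target_prefix = [
--         all(_looks_like_pytest_target(a) for a in args[: i + 1])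
--         for i in range(len(args))
--     ]
--     targets = [a for a, f in zip(args, in_target_prefix) if f]
--     selectors = [a for a, f in zip(args, in_target_prefix) if not f]
--     normalized = list(targets or args[:1])
--     if selectors:
--         normalized.extend(["-k", " and ".join(selectors)])
--     return normalized
-- ===== Notes on version B (the rewrite author's own statement) =====
-- stated objective: alternative
-- what changed: Replaces A's flag-driven single-pass accumulation loop with a stateless staged computation: a per-element boolean mask (element i is a target iff its whole prefix args[:i+1] is target-like) followed by two filter passes that partition args against that mask.
import Mathlib
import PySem

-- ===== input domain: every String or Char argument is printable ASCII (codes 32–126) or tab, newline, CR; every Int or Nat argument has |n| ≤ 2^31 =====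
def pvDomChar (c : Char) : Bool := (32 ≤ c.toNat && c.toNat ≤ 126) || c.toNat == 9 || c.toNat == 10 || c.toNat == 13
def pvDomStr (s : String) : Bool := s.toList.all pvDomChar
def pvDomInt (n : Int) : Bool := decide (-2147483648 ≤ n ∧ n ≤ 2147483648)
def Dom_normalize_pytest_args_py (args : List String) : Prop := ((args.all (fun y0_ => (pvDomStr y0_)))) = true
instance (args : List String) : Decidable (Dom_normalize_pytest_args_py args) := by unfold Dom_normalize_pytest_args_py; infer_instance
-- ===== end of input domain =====

-- B replaces A's flag-driven accumulation loop by a stateless per-element prefix mask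
-- plus two filter passes (alternative decomposition; A is total; return values agree everywhere).

-- ===== PORT A =====
-- helper _looks_like_pytest_target (shared verbatim by both Pythons)
def pvLooksLikeTarget (arg : String) : Bool :=
  PySem.Str.endswith arg ".py" || PySem.Str.isIn "::" arg || PySem.Str.isIn "/" arg
    || PySem.Str.isIn "\\" arg

-- loop body of A's for-loop: state = (targets, selectors, collecting_targets)
def pvStepA (s : List String × List String × Bool) (arg : String) :
    List String × List String × Bool :=
  if s.2.2 && pvLooksLikeTarget arg then (s.1 ++ [arg], s.2.1, s.2.2)
  else (s.1, s.2.1 ++ [arg], false)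

def normalize_pytest_args_py (args : List String) : List String :=
  if args.isEmpty then []
  else if args.any (fun a => PySem.Str.startswith a "-") then args
  else
    let st := args.foldl pvStepA ([], [], true)
    let targets := st.1
    let selectors := st.2.1
    let normalized := if targets.isEmpty then PySem.List.slice args none (some 1) else targets
    if selectors.isEmpty then normalized
    else normalized ++ ["-k", PySem.Str.join " and " selectors]

-- ===== PORT B =====
def normalize_pytest_args_py_alt (args : List String) : List String :=
  if args.isEmpty then []
  else if args.any (fun a => PySem.Str.startswith a "-") then args
  else
    -- in_target_prefix = [all(_looks_like_pytest_target(a) for a in args[:i+1]) for i in range(len(args))]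
    let mask := (List.range args.length).map
      (fun (i : Nat) => (PySem.List.slice args none (some ((i : Int) + 1))).all pvLooksLikeTarget)
    -- targets  = [a for a, f in zip(args, mask) if f]
    let targets := ((args.zip mask).filter (fun p => p.2)).map (fun p => p.1)
    -- selectors = [a for a, f in zip(args, mask) if not f]
    let selectors := ((args.zip mask).filter (fun p => !p.2)).map (fun p => p.1)
    let normalized := if targets.isEmpty then PySem.List.slice args none (some 1) else targets
    if selectors.isEmpty then normalized
    else normalized ++ ["-k", PySem.Str.join " and " selectors]

-- ===== PRECONDITION & SPEC =====
def Spec_normalize_pytest_args_py (args : List String) (out : List String) : Prop := out = normalize_pytest_args_py_alt args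
instance (args : List String) (out : List String) : Decidable (Spec_normalize_pytest_args_py args out) := by unfold Spec_normalize_pytest_args_py; infer_instance

-- ===== CLAIM (what is proved, stated in full; the proofs are below) =====
def Claim_equal_normalize_pytest_args_py : Prop := ∀ (args : List String), Dom_normalize_pytest_args_py args → Spec_normalize_pytest_args_py args (normalize_pytest_args_py args)

-- ===== LEMMAS AND PROOFS =====

-- bridge: Python's args[:i+1] is take (i+1)
theorem pvSliceTake (args : List String) (i : Nat) :
    PySem.List.slice args none (some ((i : Int) + 1)) = args.take (i + 1) := by
  have h : ((i : Int) + 1) = ((i + 1 : Nat) : Int) := by push_cast; ring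
  rw [h, PySem.List.slice_to_natCast]

-- A's loop: once collecting_targets is False, every element goes to selectors
theorem pvFoldlA_false (l ts ss : List String) :
    l.foldl pvStepA (ts, ss, false) = (ts, ss ++ l, false) := by
  induction l generalizing ss with
  | nil => simp
  | cons a l ih => simp [List.foldl_cons, pvStepA, ih]

-- A's loop from the collecting state splits the list at the first non-target
theorem pvFoldlA_true (l ts ss : List String) :
    l.foldl pvStepA (ts, ss, true) =
      (ts ++ l.takeWhile pvLooksLikeTarget, ss ++ l.dropWhile pvLooksLikeTarget,
        l.all pvLooksLikeTarget) := by
  induction l generalizing ts with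
  | nil => simp
  | cons a l ih =>
      by_cases h : pvLooksLikeTarget a = true
      · simp [List.foldl_cons, pvStepA, h, ih]
      · simp only [Bool.not_eq_true] at h
        simp [List.foldl_cons, pvStepA, h, pvFoldlA_false]

-- B's mask-filter for targets, generalized by a pending prefix conjunct b
theorem pvMaskTargets (l : List String) (b : Bool) :
    ((l.zip ((List.range l.length).map
        (fun (i : Nat) => b && (l.take (i + 1)).all pvLooksLikeTarget))).filter
      (fun p => p.2)).map (fun p => p.1)
      = if b then l.takeWhile pvLooksLikeTarget else [] := by
  induction l generalizing b with
  | nil => cases b <;> simp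
  | cons a l ih =>
      have ihT := ih true
      have ihF := ih false
      simp at ihT ihF
      simp only [List.length_cons, List.range_succ_eq_map, List.map_cons, List.map_map,
        List.take_succ_cons, List.all_cons, List.zip_cons_cons, List.filter_cons,
        List.take_zero, List.all_nil, Bool.and_true]
      have hmap : List.map ((fun i => b && (pvLooksLikeTarget a && (List.take i l).all pvLooksLikeTarget)) ∘ Nat.succ) (List.range l.length)
          = (List.range l.length).map (fun (i : Nat) => (b && pvLooksLikeTarget a) && (l.take (i + 1)).all pvLooksLikeTarget) := by
        refine List.map_congr_left (fun i _ => ?_)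
        simp [Function.comp, Bool.and_assoc]
      rw [hmap]
      cases hb : b <;> cases ha : pvLooksLikeTarget a <;>
        simp [ihT, ihF, ha]

-- B's mask-filter for selectors, generalized the same way
theorem pvMaskSelectors (l : List String) (b : Bool) :
    ((l.zip ((List.range l.length).map
        (fun (i : Nat) => b && (l.take (i + 1)).all pvLooksLikeTarget))).filter
      (fun p => !p.2)).map (fun p => p.1)
      = if b then l.dropWhile pvLooksLikeTarget else l := by
  induction l generalizing b with
  | nil => cases b <;> simp
  | cons a l ih =>
      have ihT := ih true
      have ihF := ih false
      simp at ihT ihF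
      simp only [List.length_cons, List.range_succ_eq_map, List.map_cons, List.map_map,
        List.take_succ_cons, List.all_cons, List.zip_cons_cons, List.filter_cons,
        List.take_zero, List.all_nil, Bool.and_true]
      have hmap : List.map ((fun i => b && (pvLooksLikeTarget a && (List.take i l).all pvLooksLikeTarget)) ∘ Nat.succ) (List.range l.length)
          = (List.range l.length).map (fun (i : Nat) => (b && pvLooksLikeTarget a) && (l.take (i + 1)).all pvLooksLikeTarget) := by
        refine List.map_congr_left (fun i _ => ?_)
        simp [Function.comp, Bool.and_assoc]
      rw [hmap]
      cases hb : b <;> cases ha : pvLooksLikeTarget a <;>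
        simp [ihT, ihF, ha]

-- ===== VERDICT (by name: the statement is the Claim_ definition above) =====
theorem normalize_pytest_args_py_spec : Claim_equal_normalize_pytest_args_py := by
  intro args _
  unfold Spec_normalize_pytest_args_py normalize_pytest_args_py normalize_pytest_args_py_alt
  by_cases he : args.isEmpty = true
  · rw [if_pos he, if_pos he]
  · rw [if_neg he, if_neg he]
    by_cases hd : (args.any fun a => PySem.Str.startswith a "-") = true
    · rw [if_pos hd, if_pos hd]
    · rw [if_neg hd, if_neg hd]
      have hmask : (List.range args.length).map
          (fun (i : Nat) => (PySem.List.slice args none (some ((i : Int) + 1))).all pvLooksLikeTarget)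
          = (List.range args.length).map
            (fun (i : Nat) => true && (args.take (i + 1)).all pvLooksLikeTarget) := by
        refine List.map_congr_left (fun i _ => ?_)
        rw [pvSliceTake]
        simp
      rw [pvFoldlA_true]
      simp only [hmask, pvMaskTargets, pvMaskSelectors]
      simp
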